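-- pv_equiv track=rewrite | github.com/codingtestPython/codingtest-python | ONCE_A_WEEK/WEEK3/곽태웅/03.py | solution
-- ===== SOURCE A (Python) =====
-- def solution(numbers):
--     result_list = []
--     for i in range(0, len(numbers)):
--         for j in range(0, len(numbers)):
--             k = i + j
--             if k not in result_list:
--                 result_list.append(k)
--     result_list.sort()
--     return result_list
-- ===== SOURCE B (Python) =====
-- def solution(numbers):
--     # The loop collects every distinct index sum i+j, which is exactly 0..2*len-2.
--     return list(range(2 * len(numbers) - 1))
-- ===== Notes on version B (the rewrite author's own statement) =====
-- stated objective: faster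
-- what changed: A's triple-nested scan only collects distinct index sums i+j, which form the contiguous range 0..2*len-2, so B builds that range directly in one step.
import Mathlib
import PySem

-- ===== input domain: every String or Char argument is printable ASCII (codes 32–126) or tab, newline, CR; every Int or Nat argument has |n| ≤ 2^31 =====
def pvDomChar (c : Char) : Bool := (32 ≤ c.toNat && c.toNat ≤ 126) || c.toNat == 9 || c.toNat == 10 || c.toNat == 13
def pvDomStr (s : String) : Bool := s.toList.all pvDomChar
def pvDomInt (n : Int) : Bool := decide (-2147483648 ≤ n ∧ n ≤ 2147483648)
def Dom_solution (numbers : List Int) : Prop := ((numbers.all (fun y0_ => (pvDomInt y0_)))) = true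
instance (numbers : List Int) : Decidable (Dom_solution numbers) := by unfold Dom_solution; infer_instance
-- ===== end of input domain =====

-- B replaces A's O(n^3) nested membership scans by directly constructing range(2*len-1); proven equal (return value only).

-- ===== PORT A =====
def solution (numbers : List Int) : List Int :=
  let n : Int := numbers.length
  let result_list :=
    (PySem.List.pyRange 0 n 1).foldl (fun acc i =>
      (PySem.List.pyRange 0 n 1).foldl (fun acc j =>
        let k := i + j
        if k ∈ acc then acc else acc ++ [k]) acc) []
  PySem.List.sorted result_list (fun x => x) false

-- ===== PORT B =====
def solution_alt (numbers : List Int) : List Int :=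
  PySem.List.pyRange 0 (2 * (numbers.length : Int) - 1) 1

-- ===== PRECONDITION & SPEC =====
def Spec_solution (numbers : List Int) (out : List Int) : Prop := out = solution_alt numbers
instance (numbers : List Int) (out : List Int) : Decidable (Spec_solution numbers out) := by unfold Spec_solution; infer_instance

-- ===== CLAIM (what is proved, stated in full; the proofs are below) =====
def Claim_equal_solution : Prop := ∀ (numbers : List Int), Dom_solution numbers → Spec_solution numbers (solution numbers)

-- ===== LEMMAS AND PROOFS =====

-- Inner loop: appending each i+j (j = 0..n-1) not yet present to the range [0, m) extends it to [0, max m (i+n)).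
lemma inner_fold (n : Nat) : ∀ (i m : Int), 0 ≤ i → i ≤ m →
    (PySem.List.pyRange 0 (n : Int) 1).foldl (fun acc j =>
      if i + j ∈ acc then acc else acc ++ [i + j]) (PySem.List.pyRange 0 m 1)
    = PySem.List.pyRange 0 (max m (i + n)) 1 := by
  induction n with
  | zero =>
      intro i m hi him
      rw [show ((0 : Nat) : Int) = 0 by rfl, PySem.List.pyRange_one_eq_nil le_rfl]
      simp only [List.foldl_nil]
      congr 1
      omega
  | succ n ih =>
      intro i m hi him
      rw [show ((n + 1 : Nat) : Int) = (n : Int) + 1 by push_cast; ring,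
          PySem.List.pyRange_one_succ_right (by positivity), List.foldl_append,
          ih i m hi him]
      simp only [List.foldl_cons, List.foldl_nil]
      by_cases h : i + (n : Int) < max m (i + n)
      · rw [if_pos (by rw [PySem.List.mem_pyRange_one]; exact ⟨by omega, h⟩)]
        congr 1
        omega
      · rw [if_neg (by rw [PySem.List.mem_pyRange_one]; omega)]
        rw [show max m (i + (n : Int)) = i + n by omega,
            ← PySem.List.pyRange_one_succ_right (by omega)]
        congr 1
        omega

-- Outer loop: after the first t rows (t ≤ n) the accumulator is the range [0, n+t-1) (empty for t = 0).
lemma outer_fold (n : Nat) : ∀ (t : Nat), t ≤ n →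
    (PySem.List.pyRange 0 (t : Int) 1).foldl (fun acc i =>
      (PySem.List.pyRange 0 (n : Int) 1).foldl (fun acc j =>
        if i + j ∈ acc then acc else acc ++ [i + j]) acc) []
    = PySem.List.pyRange 0 (if t = 0 then 0 else (n : Int) + t - 1) 1 := by
  intro t
  induction t with
  | zero =>
      intro _
      rw [show ((0 : Nat) : Int) = 0 by rfl, PySem.List.pyRange_one_eq_nil le_rfl]
      simp [PySem.List.pyRange_one_eq_nil le_rfl]
  | succ t ih =>
      intro ht
      rw [show ((t + 1 : Nat) : Int) = (t : Int) + 1 by push_cast; ring,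
          PySem.List.pyRange_one_succ_right (by positivity), List.foldl_append,
          ih (by omega)]
      simp only [List.foldl_cons, List.foldl_nil]
      rw [inner_fold n (t : Int) _ (by positivity) (by split_ifs with h <;> omega)]
      rcases Nat.eq_zero_or_pos t with h | h
      · subst h
        simp only [if_neg (Nat.succ_ne_zero 0)]
        congr 1
        omega
      · rw [if_neg (by omega), if_neg (by omega)]
        congr 1
        omega

lemma result_ordered (m : Int) :
    (PySem.List.pyRange 0 m 1).Pairwise (fun a b : Int => a ≤ b) :=
  (PySem.List.pairwise_lt_pyRange_one 0 m).imp (fun h => le_of_lt h)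

-- ===== VERDICT (by name: the statement is the Claim_ definition above) =====
theorem solution_spec : Claim_equal_solution := by
  intro numbers _
  show solution numbers = solution_alt numbers
  unfold solution solution_alt
  simp only []
  rw [outer_fold numbers.length numbers.length le_rfl,
      PySem.List.sorted_eq_self_of_pairwise _ _ (result_ordered _)]
  rcases Nat.eq_zero_or_pos numbers.length with h | h
  · rw [if_pos h, h, PySem.List.pyRange_one_eq_nil le_rfl,
        PySem.List.pyRange_one_eq_nil (by norm_num)]
  · rw [if_neg (by omega)]
    congr 1
    omega
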